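-- pv_equiv track=rewrite | github.com/praveen93-tp/nlp_implementations_concept | pos_tagging/pos_tagging.py | find_word_to_tags_mapping
-- ===== SOURCE A (Python) =====
-- def find_word_to_tags_mapping(bigram_word_tag_prob):
--     word_to_tag = {}
--     for key in bigram_word_tag_prob:
--         if key.split('|')[0] in word_to_tag.keys():
--             word_to_tag.get(key.split('|')[0]).add(key.split('|')[1])
--         else:
--             word_to_tag[key.split('|')[0]] = set()
--             word_to_tag[key.split('|')[0]].add(key.split('|')[1])
--     return word_to_tag
-- ===== SOURCE B (Python) =====
-- def find_word_to_tags_mapping(bigram_word_tag_prob):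
--     pairs = [key.split('|') for key in bigram_word_tag_prob]
--     words = list(dict.fromkeys(p[0] for p in pairs))
--     return {w: {p[1] for p in pairs if p[0] == w} for w in words}
-- ===== Notes on version B (the rewrite author's own statement) =====
-- stated objective: alternative
-- what changed: Replaces the single hash-accumulation pass (check key, create-or-mutate a set per entry) by a two-phase comprehension: split all keys once, collect the distinct words in first-appearance order, then build each word's tag set with one filtered comprehension per word.
import Mathlib
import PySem

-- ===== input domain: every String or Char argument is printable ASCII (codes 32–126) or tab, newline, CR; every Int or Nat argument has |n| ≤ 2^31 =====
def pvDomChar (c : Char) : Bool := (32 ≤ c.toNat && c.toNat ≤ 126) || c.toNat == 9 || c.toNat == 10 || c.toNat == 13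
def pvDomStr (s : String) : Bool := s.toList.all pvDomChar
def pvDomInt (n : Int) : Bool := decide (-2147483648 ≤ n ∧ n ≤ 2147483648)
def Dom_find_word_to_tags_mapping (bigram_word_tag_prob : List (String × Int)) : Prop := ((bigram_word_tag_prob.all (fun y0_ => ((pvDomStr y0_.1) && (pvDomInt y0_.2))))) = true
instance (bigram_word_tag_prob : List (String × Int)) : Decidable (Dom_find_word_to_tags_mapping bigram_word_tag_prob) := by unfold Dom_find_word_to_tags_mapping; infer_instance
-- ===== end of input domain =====

-- B builds the same word→tag-set dict by a two-phase comprehension (split all keys once, list the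
-- distinct words, one filtered pass per word) instead of A's per-key hash accumulation;
-- objective: alternative (not claimed faster).

-- ===== PORT A =====
-- key.split('|'): '|' is a fixed non-empty separator, so split? is always some (getD [] is exact)
def pvSplit (key : String) : List String := (PySem.Str.split? key "|").getD []
-- key.split('|')[0] — index 0 of a split is always present; getD "" is exact here.
def pvW (key : String) : String := (pvSplit key).getD 0 ""
-- key.split('|')[1] — Python raises IndexError when key has no '|'; exact under Pre_ (getD "" otherwise).
def pvT (key : String) : String := (pvSplit key).getD 1 ""

-- the loop body of A (one iteration, over one dict key)
def pvStepA (d : PySem.Dict String (List String)) (key : String) : PySem.Dict String (List String) :=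
  if pvW key ∈ d.keys then
    match d.get? (pvW key) with
    | some s => d.insert (pvW key) (PySem.Set.add s (pvT key))   -- word_to_tag.get(w).add(t)
    | none => d                                                  -- unreachable
  else
    -- word_to_tag[w] = set(); word_to_tag[w].add(t)
    (d.insert (pvW key) PySem.Set.empty).insert (pvW key)
      (PySem.Set.add ((d.insert (pvW key) PySem.Set.empty).getD (pvW key) []) (pvT key))

-- 'for key in bigram_word_tag_prob' iterates the DICT's (distinct, first-occurrence-ordered) keys
def find_word_to_tags_mapping (bigram_word_tag_prob : List (String × Int)) : List (String × List String) :=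
  ((PySem.List.dedup (bigram_word_tag_prob.map Prod.fst)).foldl pvStepA PySem.Dict.empty).items

-- ===== PORT B =====
def find_word_to_tags_mapping_alt (bigram_word_tag_prob : List (String × Int)) : List (String × List String) :=
  let pairs := (PySem.List.dedup (bigram_word_tag_prob.map Prod.fst)).map (fun key => (PySem.Str.split? key "|").getD [])
  let words := PySem.List.dedup (pairs.map (fun p => p.getD 0 ""))
  words.map (fun w => (w, PySem.Set.ofList ((pairs.filter (fun p => p.getD 0 "" == w)).map (fun p => p.getD 1 ""))))

-- ===== PRECONDITION & SPEC =====
-- Pre_ excludes exactly the keys on which key.split('|')[1] raises IndexError (no '|' in the key); A returns on everything else.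
def Pre_find_word_to_tags_mapping (bigram_word_tag_prob : List (String × Int)) : Prop :=
  ∀ p ∈ bigram_word_tag_prob, '|' ∈ p.1.toList
instance (bigram_word_tag_prob : List (String × Int)) : Decidable (Pre_find_word_to_tags_mapping bigram_word_tag_prob) := by unfold Pre_find_word_to_tags_mapping; infer_instance

def pvWitness_find_word_to_tags_mapping : (List (String × Int)) := [("dog|NN", 3), ("dog|VB", 1), ("cat|NN", 2)]

def Spec_find_word_to_tags_mapping (bigram_word_tag_prob : List (String × Int)) (out : List (String × List String)) : Prop := out = find_word_to_tags_mapping_alt bigram_word_tag_prob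
instance (bigram_word_tag_prob : List (String × Int)) (out : List (String × List String)) : Decidable (Spec_find_word_to_tags_mapping bigram_word_tag_prob out) := by unfold Spec_find_word_to_tags_mapping; infer_instance

-- ===== CLAIM (what is proved, stated in full; the proofs are below) =====
def Claim_equal_find_word_to_tags_mapping : Prop := ∀ (bigram_word_tag_prob : List (String × Int)), Dom_find_word_to_tags_mapping bigram_word_tag_prob → Pre_find_word_to_tags_mapping bigram_word_tag_prob → Spec_find_word_to_tags_mapping bigram_word_tag_prob (find_word_to_tags_mapping bigram_word_tag_prob)

-- ===== LEMMAS AND PROOFS =====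
-- A's loop body always amounts to one insert of (w, old tags ∪ {t})
theorem pvStepA_eq (d : PySem.Dict String (List String)) (key : String) :
    pvStepA d key = d.insert (pvW key) (PySem.Set.add (d.getD (pvW key) []) (pvT key)) := by
  by_cases hmem : pvW key ∈ d.keys
  · cases hg : d.get? (pvW key) with
    | none => exact absurd ((PySem.Dict.get?_eq_none_iff_not_mem_keys d _).mp hg) (not_not_intro hmem)
    | some s =>
      simp only [pvStepA, hmem, if_true, hg]
      rw [PySem.Dict.getD_eq_get?_getD, hg]
      rfl
  · simp only [pvStepA, hmem, if_false]
    rw [PySem.Dict.getD_insert_self, PySem.Dict.insert_insert_self,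
      PySem.Dict.getD_of_not_contains d _ (by
        rw [← Bool.not_eq_true, PySem.Dict.contains_iff_mem_keys]; exact hmem)]
    rfl

-- the accumulated tag set at word w, after folding A's loop over any key list
theorem pvGetD_fold (ks : List String) (d : PySem.Dict String (List String)) (w : String) :
    (ks.foldl pvStepA d).getD w [] =
      PySem.Set.update (d.getD w []) ((ks.filter (fun k => pvW k == w)).map pvT) := by
  induction ks generalizing d with
  | nil => simp [PySem.Set.update]
  | cons k t ih =>
    simp only [List.foldl_cons, ih, pvStepA_eq, List.filter_cons]
    by_cases h : pvW k = w
    · subst h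
      simp [PySem.Dict.getD_insert_self, PySem.Set.update]
    · rw [PySem.Dict.getD_insert_of_ne _ _ _ (Ne.symm h)]
      simp [h]

-- the keys of the folded dict are the distinct words, in first-appearance order
theorem pvKeys_fold (ks : List String) :
    ((ks.foldl pvStepA PySem.Dict.empty).keys) = PySem.Set.ofList (ks.map pvW) := by
  have hstep : pvStepA = fun d k => PySem.Dict.insert d (pvW k) (PySem.Set.add (d.getD (pvW k) []) (pvT k)) := by
    funext d k; exact pvStepA_eq d k
  rw [hstep, PySem.Dict.keys_foldl_insert_key ks pvW
    (fun d k => PySem.Set.add (d.getD (pvW k) []) (pvT k)) PySem.Dict.empty,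
    PySem.Dict.keys_empty, PySem.Set.update_nil_left]

theorem pvNodup_keys_fold (ks : List String) :
    ((ks.foldl pvStepA PySem.Dict.empty).keys).Nodup := by
  have hstep : pvStepA = fun d k => PySem.Dict.insert d (pvW k) (PySem.Set.add (d.getD (pvW k) []) (pvT k)) := by
    funext d k; exact pvStepA_eq d k
  rw [hstep]
  exact PySem.Dict.nodup_keys_foldl_insert_key ks pvW _ PySem.Dict.empty (by simp [PySem.Dict.keys_empty])

-- the two ports agree on EVERY input (Pre_ is only needed for the ports' faithfulness to Python)
theorem pv_main (l : List (String × Int)) :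
    find_word_to_tags_mapping l = find_word_to_tags_mapping_alt l := by
  unfold find_word_to_tags_mapping find_word_to_tags_mapping_alt
  rw [PySem.Dict.items_eq_map_keys _ (pvNodup_keys_fold _) [], pvKeys_fold]
  simp only [List.map_map, List.filter_map, Function.comp_def]
  congr 1
  funext w
  rw [pvGetD_fold, PySem.Dict.getD_empty, PySem.Set.update_nil_left]
  rfl

-- ===== VERDICT (by name: the statement is the Claim_ definition above) =====
theorem find_word_to_tags_mapping_spec : Claim_equal_find_word_to_tags_mapping := by
  intro l _ _
  unfold Spec_find_word_to_tags_mapping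
  exact pv_main l
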